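-- pv_equiv track=rewrite | github.com/azevedoe1999/CS362_CI_Project_Group_89 | task.py | conv_endian
-- ===== SOURCE A (Python) =====
-- def conv_endian(num, endian="big"):
--     """
--     This function must have the following header:
--     def conv_endian(num, endian='big').
--     This function takes in an integer value as num and
--     converts it to a hexadecimal number.
--     The endian type is determined by the flag endian.
--     The function will return the converted number as a string.
--     It has the following specifications:
--         It may be assumed that num will always be an integer
--         Must be able to handle negative values for num
--         A value of big for endian will return a hexadecimal number
--         that is big-endian
--         A value of little for endian will return a hexadecimal number
--         that is little-endian
--         Any other values of endian will return None (n.b. this is not a string,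
--         but the actual None value)
--         The returned string will have each byte separated by a space
--         Each byte must be two characters in length
--     """
--
--     # set up variables
--     HEX_DIGITS = "0123456789ABCDEF"  # hex digits table
--     is_negative = False  # flag if nun is negative or not
--
--     # if num is negative --> make num a postive so we can convert it
--     # will add negative sign at end
--     if num < 0:
--         is_negative = True
--         num = abs(num)
--
--     # Dictionary for endian mapping
--     endian_map = {"big": False, "little": True}
--     if endian not in endian_map:
--         return None
--
--     hex_num = ""  # store hex number we get from num
--
--     # if num is 0, return 0
--     if num == 0:
--         return "0"
--
--     # convert num to hex and assign it to hex_num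
--     while num > 0:
--         remainder = num % 16
--         hex_num = HEX_DIGITS[remainder] + hex_num
--         num //= 16
--
--     # pad hex_num with leading 0 if uneven
--     if len(hex_num) % 2 != 0:
--         hex_num = "0" + hex_num
--
--     # add spaces
--     chunks = [hex_num[i: i + 2] for i in range(0, len(hex_num), 2)]
--     hex_num = " ".join(chunks)
--
--     # if endian flag is little --> reverse the byte order
--     if endian_map[endian]:
--         reverse = hex_num.split()
--         hex_num = reverse[::-1]
--         hex_num = " ".join(hex_num)
--
--     # add back negative sign if num was negative
--     return f"{'-' if is_negative else ''}{hex_num}"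
-- ===== SOURCE B (Python) =====
-- def conv_endian(num, endian="big"):
--     if endian not in ("big", "little"):
--         return None
--     if num == 0:
--         return "0"
--     n = abs(num)
--     data = n.to_bytes((n.bit_length() + 7) // 8, byteorder=endian)
--     body = " ".join(f"{b:02X}" for b in data)
--     return ("-" if num < 0 else "") + body
-- ===== Notes on version B (the rewrite author's own statement) =====
-- stated objective: idiomatic
-- what changed: Replaces the manual base-16 digit loop, odd-length padding, slice-based chunking and split/reverse/join little-endian pass with int.to_bytes (which yields the bytes in the requested order directly) and per-byte '%02X' formatting joined by spaces.
import Mathlib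
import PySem

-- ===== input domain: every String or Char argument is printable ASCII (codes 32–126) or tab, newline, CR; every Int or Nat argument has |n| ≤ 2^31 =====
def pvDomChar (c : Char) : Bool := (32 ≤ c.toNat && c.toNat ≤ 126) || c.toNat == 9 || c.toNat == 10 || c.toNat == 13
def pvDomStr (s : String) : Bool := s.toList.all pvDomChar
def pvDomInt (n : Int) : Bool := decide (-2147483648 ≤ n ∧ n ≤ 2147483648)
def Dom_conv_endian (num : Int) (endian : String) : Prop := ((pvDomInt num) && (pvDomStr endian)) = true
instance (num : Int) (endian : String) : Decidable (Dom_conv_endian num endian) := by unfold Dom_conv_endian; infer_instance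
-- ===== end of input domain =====

-- B replaces A's manual base-16 digit loop, padding, slice chunking and split/reverse/join
-- little-endian pass by emitting the bytes directly in the requested order (int.to_bytes in
-- Python, the corresponding byte recursion here) and formatting each byte as two hex chars.

-- ===== PORT A =====
-- HEX_DIGITS = "0123456789ABCDEF"
def pvHexTable : List Char := ['0','1','2','3','4','5','6','7','8','9','A','B','C','D','E','F']

-- while num > 0: hex_num = HEX_DIGITS[num % 16] + hex_num; num //= 16
-- (run on the absolute value, a nonnegative int, so Python's % and // are Nat.mod/Nat.div;
--  HEX_DIGITS[r] has 0 ≤ r < 16 so the string index never raises: ported as getD)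
def pvConvLoop (n : Nat) (hex : List Char) : List Char :=
  if n = 0 then hex
  else pvConvLoop (n / 16) (pvHexTable.getD (n % 16) ' ' :: hex)
  termination_by n
  decreasing_by exact Nat.div_lt_self (Nat.pos_of_ne_zero (by assumption)) (by omega)

def conv_endian (num : Int) (endian : String) : Option String :=
  let isNegative : Bool := decide (num < 0)
  let n : Nat := num.natAbs      -- if num < 0: num = abs(num)  (abs is the identity otherwise)
  let endianMap : PySem.Dict String Bool :=
    (PySem.Dict.empty.insert "big" false).insert "little" true
  if endianMap.contains endian = false then none
  else if n = 0 then some "0"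
  else
    let hexNum0 := pvConvLoop n []
    let hexNum1 := if hexNum0.length % 2 ≠ 0 then '0' :: hexNum0 else hexNum0
    -- chunks = [hex_num[i:i+2] for i in range(0, len(hex_num), 2)]
    let chunks := (PySem.List.pyRange 0 (hexNum1.length : Int) 2).map
        (fun i => PySem.List.slice hexNum1 (some i) (some (i + 2)))
    let joined := PySem.Chars.join [' '] chunks
    let final :=
      if endianMap.getD endian false then
        -- reverse = hex_num.split(); hex_num = reverse[::-1]; hex_num = " ".join(hex_num)
        -- (step -1 slice never raises: ported via getD)
        PySem.Chars.join [' ']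
          ((PySem.List.slice? (PySem.Chars.split₀ joined) none none (-1)).getD [])
      else joined
    some (String.ofList (if isNegative then '-' :: final else final))

-- ===== PORT B =====
-- one '%X' digit (f"{b:02X}" formats each nibble this way)
def pvHexChar (d : Nat) : Char :=
  if d < 10 then Char.ofNat (48 + d) else Char.ofNat (55 + d)

-- f"{b:02X}" for a byte 0 ≤ b < 256
def pvHexByte (b : Nat) : List Char := [pvHexChar (b / 16), pvHexChar (b % 16)]

-- n.to_bytes((n.bit_length()+7)//8, 'little') as a list of byte values, n > 0
def pvBytesLE (n : Nat) : List Nat :=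
  if n = 0 then [] else n % 256 :: pvBytesLE (n / 256)
  termination_by n
  decreasing_by exact Nat.div_lt_self (Nat.pos_of_ne_zero (by assumption)) (by omega)

def conv_endian_alt (num : Int) (endian : String) : Option String :=
  if endian = "big" ∨ endian = "little" then
    if num = 0 then some "0"
    else
      let bs := pvBytesLE num.natAbs
      let ordered := if endian = "big" then bs.reverse else bs   -- to_bytes byte order
      let body := PySem.Chars.join [' '] (ordered.map pvHexByte)
      some (String.ofList (if num < 0 then '-' :: body else body))
  else none

-- ===== PRECONDITION & SPEC =====
def Spec_conv_endian (num : Int) (endian : String) (out : Option String) : Prop := out = conv_endian_alt num endian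
instance (num : Int) (endian : String) (out : Option String) : Decidable (Spec_conv_endian num endian out) := by unfold Spec_conv_endian; infer_instance

-- ===== CLAIM (what is proved, stated in full; the proofs are below) =====
def Claim_equal_conv_endian : Prop := ∀ (num : Int) (endian : String), Dom_conv_endian num endian → Spec_conv_endian num endian (conv_endian num endian)

-- ===== LEMMAS AND PROOFS =====

-- A's digits, most-significant first (the value pvConvLoop builds up)
def pvDigits (n : Nat) : List Char :=
  if n = 0 then [] else pvDigits (n / 16) ++ [pvHexTable.getD (n % 16) ' ']
  termination_by n
  decreasing_by exact Nat.div_lt_self (Nat.pos_of_ne_zero (by assumption)) (by omega)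

-- A's table pair for a byte (what the padded digit string decomposes into)
def pvPairA (b : Nat) : List Char := [pvHexTable.getD (b / 16) ' ', pvHexTable.getD (b % 16) ' ']

def pvPad (cs : List Char) : List Char := if cs.length % 2 ≠ 0 then '0' :: cs else cs

theorem pvConvLoop_eq (n : Nat) (acc : List Char) : pvConvLoop n acc = pvDigits n ++ acc := by
  induction n using Nat.strong_induction_on generalizing acc with
  | _ n ih =>
    rw [pvConvLoop, pvDigits]
    by_cases h : n = 0
    · simp [h]
    · simp only [h, if_false]
      rw [ih (n / 16) (Nat.div_lt_self (Nat.pos_of_ne_zero h) (by omega))]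
      simp

theorem pvBytesLE_lt (n : Nat) : ∀ b ∈ pvBytesLE n, b < 256 := by
  induction n using Nat.strong_induction_on with
  | _ n ih =>
    rw [pvBytesLE]
    by_cases h : n = 0
    · simp [h]
    · simp only [h, if_false, List.mem_cons]
      rintro b (rfl | hb)
      · omega
      · exact ih (n / 256) (Nat.div_lt_self (Nat.pos_of_ne_zero h) (by omega)) b hb

theorem pvPad_append_pair (cs : List Char) (b : Nat) :
    pvPad (cs ++ pvPairA b) = pvPad cs ++ pvPairA b := by
  unfold pvPad pvPairA
  simp only [List.length_append, List.length_cons, List.length_nil]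
  by_cases h : cs.length % 2 ≠ 0 <;> simp [h]

theorem pvDigits_byte_step (n : Nat) (h : 256 ≤ n) :
    pvDigits n = pvDigits (n / 256) ++ pvPairA (n % 256) := by
  have h16 : n / 16 ≠ 0 := by omega
  rw [pvDigits, pvDigits]
  simp only [show n ≠ 0 by omega, h16, if_false]
  have e1 : n / 16 / 16 = n / 256 := by omega
  have e2 : n / 16 % 16 = n % 256 / 16 := by omega
  have e3 : n % 16 = n % 256 % 16 := by omega
  rw [e1, e2, e3, pvPairA]
  simp

-- main correspondence: padded digit string = concatenation of big-endian byte pairs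
theorem pvPad_digits (n : Nat) (h : 0 < n) :
    pvPad (pvDigits n) = ((pvBytesLE n).reverse.map pvPairA).flatten := by
  induction n using Nat.strong_induction_on with
  | _ n ih =>
    by_cases hbig : 256 ≤ n
    · have hq : 0 < n / 256 := by omega
      rw [pvDigits_byte_step n hbig, pvPad_append_pair, ih (n / 256) (by omega) hq]
      conv_rhs => rw [pvBytesLE, if_neg (show ¬ n = 0 by omega)]
      simp
    · -- 1 ≤ n < 256 : one byte
      have hb : pvBytesLE n = [n] := by
        rw [pvBytesLE, if_neg (show ¬ n = 0 by omega), Nat.mod_eq_of_lt (by omega),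
            pvBytesLE, if_pos (Nat.div_eq_of_lt (by omega))]
      rw [hb]
      simp only [List.reverse_singleton, List.map_cons, List.map_nil, List.flatten]
      by_cases hsm : n < 16
      · have d0 : pvDigits (n / 16) = [] := by
          rw [Nat.div_eq_of_lt hsm, pvDigits]; simp
        rw [pvDigits, if_neg (show ¬ n = 0 by omega), d0]
        simp [pvPad, pvPairA, pvHexTable, Nat.div_eq_of_lt hsm]
      · have hq : n / 16 < 16 := by omega
        have d0 : pvDigits (n / 16 / 16) = [] := by
          rw [show n / 16 / 16 = 0 by omega, pvDigits]; simp
        rw [pvDigits, if_neg (show ¬ n = 0 by omega),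
            pvDigits, if_neg (show ¬ n / 16 = 0 by omega), d0]
        simp [pvPad, pvPairA, Nat.mod_eq_of_lt hq]

theorem pvPairA_eq_hexByte (b : Nat) (h : b < 256) : pvPairA b = pvHexByte b := by
  have h1 : b / 16 < 16 := by omega
  have h2 : b % 16 < 16 := by omega
  unfold pvPairA pvHexByte
  congr 1
  · interval_cases h' : b / 16 <;> decide
  · congr 1
    interval_cases h' : b % 16 <;> decide


theorem pv_flatten_len (qs : List (List Char)) (h : ∀ p ∈ qs, p.length = 2) :
    qs.flatten.length = 2 * qs.length := by
  induction qs with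
  | nil => simp
  | cons p ps ih =>
    simp only [List.flatten_cons, List.length_append, List.length_cons]
    rw [h p (by simp), ih (fun q hq => h q (by simp [hq]))]
    ring

theorem pv_chunk_get : ∀ (ps : List (List Char)), (∀ p ∈ ps, p.length = 2) →
    ∀ (j : ℕ) (hj : j < ps.length), ((ps.flatten).drop (2 * j)).take 2 = ps[j]
  | [], _, j, hj => absurd hj (by simp)
  | p :: ps, h, 0, _ => by
      obtain ⟨a, b, rfl⟩ := List.length_eq_two.mp (h p (by simp))
      simp
  | p :: ps, h, (j + 1), hj => by
      obtain ⟨a, b, rfl⟩ := List.length_eq_two.mp (h p (by simp))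
      have ih := pv_chunk_get ps (fun q hq => h q (by simp [hq])) j (by simpa using hj)
      rw [show 2 * (j + 1) = 2 * j + 1 + 1 by ring]
      simpa using ih

theorem pv_chunks (ps : List (List Char)) (h : ∀ p ∈ ps, p.length = 2) :
    (PySem.List.pyRange 0 ((ps.flatten).length : Int) 2).map
      (fun i => PySem.List.slice ps.flatten (some i) (some (i + 2))) = ps := by
  rw [pv_flatten_len ps h, PySem.List.pyRange_of_pos 0 _ (by norm_num)]
  have hcnt : (if (0:ℤ) < ((2 * ps.length : ℕ) : ℤ) then
      ((((2 * ps.length : ℕ) : ℤ) - 0 + 2 - 1) / 2).toNat else 0) = ps.length := by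
    by_cases hk : ps.length = 0
    · simp [hk]
    · rw [if_pos (by push_cast; omega)]
      omega
  rw [hcnt, List.map_map]
  apply List.ext_getElem (by simp)
  intro j h1 h2
  simp only [List.getElem_map, List.getElem_range, Function.comp_apply]
  have hj : j < ps.length := by simpa using h1
  have hcast : (0 : ℤ) + 2 * (j : ℤ) = ((2 * j : ℕ) : ℤ) := by push_cast; ring
  rw [hcast, show ((2 * j : ℕ) : ℤ) + 2 = ((2 * j : ℕ) : ℤ) + ((2 : ℕ) : ℤ) by norm_num,
    PySem.List.slice_natCast_add]
  exact pv_chunk_get ps h j hj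

theorem pv_go_chunk (p : List Char) (hp : ∀ c ∈ p, PySem.Chars.isspace c = false) :
    ∀ (rest cur : List Char) (acc : List (List Char)),
    PySem.Chars.split₀.go (p ++ rest) cur acc =
      PySem.Chars.split₀.go rest (p.reverse ++ cur) acc := by
  induction p with
  | nil => intro rest cur acc; simp
  | cons c p ih =>
    intro rest cur acc
    rw [List.cons_append, PySem.Chars.split₀.go, if_neg (by simp [hp c (by simp)]),
      ih (fun d hd => hp d (by simp [hd])) rest (c :: cur) acc]
    simp

theorem pv_go_join (ps : List (List Char))
    (h : ∀ p ∈ ps, p ≠ [] ∧ ∀ c ∈ p, PySem.Chars.isspace c = false) :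
    ∀ acc : List (List Char),
    PySem.Chars.split₀.go (PySem.Chars.join [' '] ps) [] acc = acc.reverse ++ ps := by
  induction ps with
  | nil =>
    intro acc
    rw [PySem.Chars.join_nil, PySem.Chars.split₀.go]
    simp
  | cons p ps ih =>
    intro acc
    obtain ⟨hne, hsp⟩ := h p (by simp)
    cases ps with
    | nil =>
      rw [PySem.Chars.join_singleton, show p = p ++ [] by simp, pv_go_chunk p hsp,
        PySem.Chars.split₀.go]
      simp [hne]
    | cons q ps' =>
      rw [PySem.Chars.join_cons_cons, List.append_assoc, pv_go_chunk p hsp,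
        List.singleton_append, PySem.Chars.split₀.go, if_pos (by decide),
        if_neg (by simp [hne]), List.append_nil, List.reverse_reverse,
        ih (fun r hr => h r (by simp [hr])) (p :: acc)]
      simp

theorem pv_split_join (ps : List (List Char))
    (h : ∀ p ∈ ps, p ≠ [] ∧ ∀ c ∈ p, PySem.Chars.isspace c = false) :
    PySem.Chars.split₀ (PySem.Chars.join [' '] ps) = ps := by
  have := pv_go_join ps h []
  simpa [PySem.Chars.split₀] using this

theorem pvPairA_not_space (b : Nat) (hb : b < 256) :
    pvPairA b ≠ [] ∧ ∀ c ∈ pvPairA b, PySem.Chars.isspace c = false := by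
  have key : ∀ d, d < 16 → PySem.Chars.isspace (pvHexTable.getD d ' ') = false := by decide
  refine ⟨by simp [pvPairA], ?_⟩
  intro c hc
  rcases (by simpa [pvPairA] using hc :
      c = pvHexTable.getD (b / 16) ' ' ∨ c = pvHexTable.getD (b % 16) ' ') with rfl | rfl
  · exact key _ (by omega)
  · exact key _ (by omega)

-- ===== VERDICT (by name: the statement is the Claim_ definition above) =====
theorem conv_endian_spec : Claim_equal_conv_endian := by
  intro num endian _
  unfold Spec_conv_endian conv_endian conv_endian_alt
  by_cases hend : endian = "big" ∨ endian = "little"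
  · by_cases h0 : num = 0
    · have hcb : (((PySem.Dict.empty : PySem.Dict String Bool).insert "big" false).insert
          "little" true).contains "big" = true := by decide
      have hcl : (((PySem.Dict.empty : PySem.Dict String Bool).insert "big" false).insert
          "little" true).contains "little" = true := by decide
      rcases hend with rfl | rfl <;> simp [h0, hcb, hcl]
    · have hnpos : 0 < num.natAbs := Int.natAbs_pos.mpr h0
      have hps : ∀ p ∈ (pvBytesLE num.natAbs).reverse.map pvPairA, p.length = 2 := by
        intro p hp
        simp only [List.mem_map] at hp
        obtain ⟨b, _, rfl⟩ := hp
        rfl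
      have hflat : pvPad (pvConvLoop num.natAbs []) =
          ((pvBytesLE num.natAbs).reverse.map pvPairA).flatten := by
        rw [pvConvLoop_eq, List.append_nil]
        exact pvPad_digits _ hnpos
      have hhex : ((pvBytesLE num.natAbs).reverse.map pvHexByte) =
          ((pvBytesLE num.natAbs).reverse.map pvPairA) := by
        apply List.map_congr_left
        intro b hb
        exact (pvPairA_eq_hexByte b (pvBytesLE_lt _ b (List.mem_reverse.mp hb))).symm
      rcases hend with rfl | rfl
      · have hc : (((PySem.Dict.empty : PySem.Dict String Bool).insert "big" false).insert
            "little" true).contains "big" = true := by decide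
        have hg : (((PySem.Dict.empty : PySem.Dict String Bool).insert "big" false).insert
            "little" true).getD "big" false = false := by decide
        have hpad : (if (pvConvLoop num.natAbs []).length % 2 ≠ 0 then
            '0' :: pvConvLoop num.natAbs [] else pvConvLoop num.natAbs []) =
            pvPad (pvConvLoop num.natAbs []) := rfl
        simp only [hc, hg, h0, Int.natAbs_eq_zero, Bool.false_eq_true, if_false]
        rw [hpad, hflat, pv_chunks _ hps, ← hhex]
        simp
      · have hc : (((PySem.Dict.empty : PySem.Dict String Bool).insert "big" false).insert
            "little" true).contains "little" = true := by decide
        have hg : (((PySem.Dict.empty : PySem.Dict String Bool).insert "big" false).insert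
            "little" true).getD "little" false = true := by decide
        have hpad : (if (pvConvLoop num.natAbs []).length % 2 ≠ 0 then
            '0' :: pvConvLoop num.natAbs [] else pvConvLoop num.natAbs []) =
            pvPad (pvConvLoop num.natAbs []) := rfl
        have hcond : ∀ p ∈ (pvBytesLE num.natAbs).reverse.map pvPairA,
            p ≠ [] ∧ ∀ c ∈ p, PySem.Chars.isspace c = false := by
          intro p hp
          simp only [List.mem_map, List.mem_reverse] at hp
          obtain ⟨b, hb, rfl⟩ := hp
          exact pvPairA_not_space b (pvBytesLE_lt _ b hb)
        have hhex2 : ((pvBytesLE num.natAbs).map pvHexByte) =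
            ((pvBytesLE num.natAbs).map pvPairA) := by
          apply List.map_congr_left
          intro b hb
          exact (pvPairA_eq_hexByte b (pvBytesLE_lt _ b hb)).symm
        simp only [hc, hg, h0, Int.natAbs_eq_zero, if_false]
        rw [hpad, hflat, pv_chunks _ hps, pv_split_join _ hcond,
          PySem.List.slice?_none_none_neg_one]
        rw [← List.map_reverse, List.reverse_reverse]
        simp only [Option.getD_some]
        rw [← hhex2]
        simp
  · have hc : (((PySem.Dict.empty : PySem.Dict String Bool).insert "big" false).insert
        "little" true).contains endian = false := by
      rw [not_or] at hend
      simp [PySem.Dict.contains_insert, PySem.Dict.contains_empty, hend.1, hend.2]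
    simp [hc, hend]
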